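-- pv_equiv track=rewrite | github.com/lizardp1/flag_game | nnd/flag_game/model_mix.py | _agent_model_signature
-- ===== SOURCE A (Python) =====
-- from collections.abc import Sequence
--
-- def _agent_model_signature(agent_models: Sequence[str]) -> str:
--     counts: dict[str, int] = {}
--     for model in agent_models:
--         counts[str(model)] = counts.get(str(model), 0) + 1
--     if len(counts) == 1:
--         only_model = next(iter(counts))
--         return f"all:{only_model}"
--     return " + ".join(f"{model} x{count}" for model, count in counts.items())
-- ===== SOURCE B (Python) =====
-- def _agent_model_signature(agent_models):
--     # partition-and-remove: peel off the first model and all its duplicates,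
--     # its count is the number of elements removed; repeat on the remainder.
--     items = [str(m) for m in agent_models]
--     pairs = []
--     while items:
--         head = items[0]
--         rest = [x for x in items[1:] if x != head]
--         pairs.append((head, len(items) - len(rest)))
--         items = rest
--     if len(pairs) == 1:
--         return f"all:{pairs[0][0]}"
--     return " + ".join(f"{m} x{c}" for m, c in pairs)
-- ===== Notes on version B (the rewrite author's own statement) =====
-- stated objective: alternative
-- what changed: B drops A's accumulating dict counter entirely: a partition-and-remove loop peels off the first model, derives its count as len(items)-len(rest) after filtering out its duplicates, and continues on the remainder, building the (model,count) pairs directly; formatting is unchanged.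
import Mathlib
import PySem

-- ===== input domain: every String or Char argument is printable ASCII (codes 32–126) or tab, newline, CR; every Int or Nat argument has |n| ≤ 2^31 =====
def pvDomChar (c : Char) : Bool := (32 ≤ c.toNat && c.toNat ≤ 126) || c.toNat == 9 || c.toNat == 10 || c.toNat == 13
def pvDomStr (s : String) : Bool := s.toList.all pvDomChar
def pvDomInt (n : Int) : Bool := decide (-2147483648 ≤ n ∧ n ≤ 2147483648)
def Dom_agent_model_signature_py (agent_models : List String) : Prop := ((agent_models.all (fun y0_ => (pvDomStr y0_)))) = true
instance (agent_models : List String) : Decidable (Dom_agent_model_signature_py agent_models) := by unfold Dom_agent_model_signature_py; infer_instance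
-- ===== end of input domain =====

-- B replaces A's accumulating dict counter with a partition-and-remove loop (no dict); same output.

-- ===== PORT A =====
-- counts[str(model)] = counts.get(str(model), 0) + 1  (str() is identity on str inputs)
def agent_model_signature_py (agent_models : List String) : String :=
  let counts : PySem.Dict String Int :=
    agent_models.foldl (fun d m => d.insert m (d.getD m 0 + 1)) PySem.Dict.empty
  if counts.size = 1 then
    "all:" ++ counts.keys.headD ""
  else
    PySem.Str.join " + " (counts.items.map (fun p => p.1 ++ " x" ++ PySem.Int.toStr p.2))

-- ===== PORT B =====
-- the while loop: head = items[0]; rest = [x for x in items[1:] if x != head];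
-- pairs.append((head, len(items) - len(rest))); items = rest  — ported as structural
-- recursion on the shrinking items list (each iteration emits one pair)
def pvGroups : List String → List (String × Int)
  | [] => []
  | h :: t =>
    let rest := t.filter (fun x => x ≠ h)
    (h, ((h :: t).length : Int) - (rest.length : Int)) :: pvGroups rest
termination_by xs => xs.length
decreasing_by
  simp only [List.length_unattach, List.length_cons, Nat.lt_succ_iff]
  exact le_trans (List.length_filter_le _ _) (by simp)

def agent_model_signature_py_alt (agent_models : List String) : String :=
  let pairs := pvGroups (agent_models.map (fun m => m))
  if pairs.length = 1 then
    "all:" ++ (pairs.headD ("", 0)).1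
  else
    PySem.Str.join " + " (pairs.map (fun p => p.1 ++ " x" ++ PySem.Int.toStr p.2))

-- ===== PRECONDITION & SPEC =====
def Spec_agent_model_signature_py (agent_models : List String) (out : String) : Prop := out = agent_model_signature_py_alt agent_models
instance (agent_models : List String) (out : String) : Decidable (Spec_agent_model_signature_py agent_models out) := by unfold Spec_agent_model_signature_py; infer_instance

-- ===== CLAIM =====
def Claim_equal_agent_model_signature_py : Prop := ∀ (agent_models : List String), Dom_agent_model_signature_py agent_models → Spec_agent_model_signature_py agent_models (agent_model_signature_py agent_models)

-- ===== LEMMAS AND PROOFS =====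

-- folding Set.add over a list may drop every element already present in the accumulator
theorem pv_foldl_add_skip {α : Type} [DecidableEq α] (xs : List α) (acc : List α) (h : α)
    (hm : h ∈ acc) :
    xs.foldl PySem.Set.add acc = (xs.filter (fun x => x ≠ h)).foldl PySem.Set.add acc := by
  induction xs generalizing acc with
  | nil => rfl
  | cons x t ih =>
    by_cases hx : x = h
    · subst hx
      simp only [List.filter_cons, ne_eq, not_true_eq_false, decide_false,
        List.foldl_cons, PySem.Set.add_of_mem hm]
      exact ih acc hm
    · simp only [List.filter_cons, ne_eq, hx, not_false_eq_true, decide_true, List.foldl_cons]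
      exact ih _ ((PySem.Set.mem_add _ _ _).mpr (Or.inl hm))

theorem pv_ofList_cons_filter {α : Type} [DecidableEq α] (h : α) (t : List α) :
    PySem.Set.ofList (h :: t) = PySem.Set.ofList (h :: t.filter (fun x => x ≠ h)) := by
  simp only [PySem.Set.ofList_eq_foldl, List.foldl_cons]
  exact pv_foldl_add_skip t (PySem.Set.add [] h) h (by simp [PySem.Set.add])

-- pvGroups xs is exactly the (distinct model, count) pairs in first-occurrence order
theorem pvGroups_eq (xs : List String) :
    pvGroups xs = (PySem.Set.ofList xs).map (fun k => (k, (xs.count k : Int))) := by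
  induction xs using pvGroups.induct with
  | case1 => simp [pvGroups]
  | case2 h t rest ih =>
    have hrest : rest = t.filter (fun x => x ≠ h) := by
      show (List.filter _ t.attach).unattach = _
      rw [List.unattach_filter (g := fun x => decide (x ≠ h)) (hf := fun x hx => rfl),
        List.unattach_attach]
    rw [hrest] at ih
    rw [pvGroups]
    rw [pv_ofList_cons_filter h t, PySem.Set.ofList_cons]
    have hnr : h ∉ t.filter (fun x => x ≠ h) := by simp
    have hdis : PySem.Set.discard (PySem.Set.ofList (t.filter (fun x => x ≠ h))) h
        = PySem.Set.ofList (t.filter (fun x => x ≠ h)) := by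
      simp only [PySem.Set.discard]
      refine List.filter_eq_self.mpr ?_
      intro a ha
      have : a ∈ t.filter (fun x => x ≠ h) := (PySem.Set.mem_ofList _ _).mp ha
      simp only [List.mem_filter, ne_eq, decide_eq_true_eq] at this
      simpa using this.2
    rw [hdis, List.map_cons, ih]
    have hfe : t.filter (fun x => !decide (x = h)) = t.filter (fun x => x ≠ h) := by
      apply List.filter_congr; intro a _; simp
    refine congrArg₂ (· :: ·) ?_ ?_
    · -- head pair: (h::t).count h = (h::t).length - (filter ≠ h).length
      have h1 : t.length = (t.filter (fun x => x = h)).length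
          + (t.filter (fun x => x ≠ h)).length := by
        rw [List.length_eq_length_filter_add (l := t) (fun x => decide (x = h)), hfe]
      have h2 : (t.filter (fun x => x = h)).length = t.count h := by
        rw [List.count_eq_length_filter]
        congr 1
      have h3 : (h :: t).count h = t.count h + 1 := by simp
      refine Prod.ext rfl ?_
      simp only [h3, List.length_cons]
      push_cast [h1, ← h2]
      ring
    · -- tail pairs: counts of models ≠ h agree
      apply List.map_congr_left
      intro k hk
      have hkr : k ∈ t.filter (fun x => x ≠ h) := (PySem.Set.mem_ofList _ _).mp hk
      have hkh : k ≠ h := by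
        intro he; subst he; exact hnr hkr
      have hc : (t.filter (fun x => x ≠ h)).count k = t.count k := by
        rw [List.count_filter]
        simp [hkh]
      have hc2 : (h :: t).count k = t.count k := by
        simp [Ne.symm hkh]
      refine Prod.ext rfl ?_
      simp only [hc2]
      exact_mod_cast hc

-- ===== VERDICT =====
theorem agent_model_signature_py_spec : Claim_equal_agent_model_signature_py := by
  intro xs _
  unfold Spec_agent_model_signature_py agent_model_signature_py agent_model_signature_py_alt
  rw [PySem.Dict.foldl_insert_getD_add_one_eq_counter]
  simp only [List.map_id_fun', id, pvGroups_eq]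
  simp only [PySem.Dict.size, PySem.Dict.keys, PySem.Dict.items_counter, List.length_map,
    List.map_map]
  cases PySem.Set.ofList xs with
  | nil => simp
  | cons a l =>
    cases l with
    | nil => simp
    | cons b l2 => simp [Function.comp]
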